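-- pv_equiv track=rewrite | github.com/juanjoseexpositogonzalez/aoc25 | day09/main.py | precompute_interior_ranges
-- ===== SOURCE A (Python) =====
-- from collections import defaultdict
-- from typing import Final, List, Self, Tuple, Set
--
-- def precompute_interior_ranges(border: Set[Tuple[int, int]],
--                                 bounds: Tuple[int, int, int, int]) -> dict[int, List[Tuple[int, int]]]:
--     """
--     Para cada Y, calcula los rangos [x_start, x_end] que están dentro del polígono.
--     """
--     min_x, max_x, min_y, max_y = bounds
--
--     border_by_y = defaultdict(list)
--     for x, y in border:
--         border_by_y[y].append(x)
--
--     interior_ranges = {}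
--
--     for y in range(min_y, max_y + 1):
--         if y not in border_by_y:
--             continue
--
--         xs = sorted(border_by_y[y])
--         ranges = []
--
--         # Los puntos del borde vienen en pares: entrada/salida
--         # Entre cada par está el interior
--         for i in range(0, len(xs) - 1, 2):
--             if i + 1 < len(xs):
--                 ranges.append((xs[i], xs[i + 1]))
--
--         interior_ranges[y] = ranges
--
--     return interior_ranges
-- ===== SOURCE B (Python) =====
-- def precompute_interior_ranges(border, bounds):
--     """Sort the whole border once by (y, x), then sweep it row by row:
--     each maximal run of equal y is one row, its x's already ascending."""
--     min_x, max_x, min_y, max_y = bounds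
--     pts = sorted(border, key=lambda p: (p[1], p[0]))
--     interior_ranges = {}
--     i, n = 0, len(pts)
--     while i < n:
--         y = pts[i][1]
--         j = i
--         while j < n and pts[j][1] == y:
--             j += 1
--         if min_y <= y <= max_y:
--             xs = [p[0] for p in pts[i:j]]
--             interior_ranges[y] = list(zip(xs[::2], xs[1::2]))
--         i = j
--     return interior_ranges
-- ===== Notes on version B (the rewrite author's own statement) =====
-- stated objective: alternative
-- what changed: Replaces the defaultdict bucketing plus a scan over every y in range(min_y, max_y+1) with per-row sorting and an index-pairing loop by one global sort of the border by (y, x) followed by a single sweep that cuts the sorted list into equal-y runs and pairs each run's already-ascending x's via zip of even/odd slices.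
import Mathlib
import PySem

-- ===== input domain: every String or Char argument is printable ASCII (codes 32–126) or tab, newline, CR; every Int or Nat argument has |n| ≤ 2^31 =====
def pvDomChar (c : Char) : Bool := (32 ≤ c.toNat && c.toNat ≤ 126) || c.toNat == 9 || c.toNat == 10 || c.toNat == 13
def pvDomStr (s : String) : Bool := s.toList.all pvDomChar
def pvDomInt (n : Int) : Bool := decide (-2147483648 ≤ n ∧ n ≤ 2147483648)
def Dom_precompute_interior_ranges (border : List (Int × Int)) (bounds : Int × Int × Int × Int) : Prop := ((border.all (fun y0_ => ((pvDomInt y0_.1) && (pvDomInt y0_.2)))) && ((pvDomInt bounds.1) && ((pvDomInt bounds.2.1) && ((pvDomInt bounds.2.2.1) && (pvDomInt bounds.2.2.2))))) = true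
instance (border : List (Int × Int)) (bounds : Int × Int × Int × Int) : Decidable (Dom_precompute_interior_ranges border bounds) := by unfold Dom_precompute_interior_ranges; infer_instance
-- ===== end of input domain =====

-- B re-implements the grouping by one global (y, x) sort plus a single run-cutting sweep
-- instead of A's defaultdict bucketing and scan over every y in range(min_y, max_y+1);
-- equivalence of the RETURN value is proved (alternative decomposition, no speed claim).

-- ===== PORT A =====
-- border_by_y = defaultdict(list); for x, y in border: border_by_y[y].append(x)
def pvDictA (border : List (Int × Int)) : PySem.Dict Int (List Int) :=
  border.foldl (fun d p => d.modify p.2 [] (fun xs => xs ++ [p.1])) PySem.Dict.empty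

-- for i in range(0, len(xs) - 1, 2): if i + 1 < len(xs): ranges.append((xs[i], xs[i + 1]))
def pvRowRangesA (xs : List Int) : List (Int × Int) :=
  (PySem.List.pyRange 0 ((xs.length : Int) - 1) 2).foldl
    (fun r i =>
      if i + 1 < (xs.length : Int) then
        r ++ [(PySem.List.pyGetD xs i 0, PySem.List.pyGetD xs (i + 1) 0)]
      else r) []

def precompute_interior_ranges (border : List (Int × Int)) (bounds : Int × Int × Int × Int) : List (Int × List (Int × Int)) :=
  let min_y := bounds.2.2.1
  let max_y := bounds.2.2.2
  let d := pvDictA border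
  (PySem.List.pyRange min_y (max_y + 1) 1).foldl
    (fun acc y =>
      if d.contains y then
        acc ++ [(y, pvRowRangesA (PySem.List.sorted (d.getD y []) (fun x => x) false))]
      else acc) []

-- ===== PORT B =====
-- list(zip(xs[::2], xs[1::2]))
def pvPairZip (xs : List Int) : List (Int × Int) :=
  List.zip ((PySem.List.slice? xs none none 2).getD [])
           ((PySem.List.slice? xs (some 1) none 2).getD [])

-- the sweep: cut the (y, x)-sorted list into maximal equal-y runs; emit in-bounds rows
def pvGroupRows (min_y max_y : Int) : List (Int × Int) → List (Int × List (Int × Int))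
  | [] => []
  | p :: rest =>
      let grp := p :: rest.takeWhile (fun q => q.2 == p.2)
      let rest' := rest.dropWhile (fun q => q.2 == p.2)
      if min_y ≤ p.2 ∧ p.2 ≤ max_y then
        (p.2, pvPairZip (grp.map (·.1))) :: pvGroupRows min_y max_y rest'
      else pvGroupRows min_y max_y rest'
termination_by l => l.length
decreasing_by
  all_goals simp only [List.length_cons]
  all_goals exact Nat.lt_succ_of_le (List.length_dropWhile_le _ _)

def precompute_interior_ranges_alt (border : List (Int × Int)) (bounds : Int × Int × Int × Int) : List (Int × List (Int × Int)) :=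
  let min_y := bounds.2.2.1
  let max_y := bounds.2.2.2
  pvGroupRows min_y max_y (PySem.List.sorted2 border (fun p => p.2) (fun p => p.1) false)

-- ===== PRECONDITION & SPEC =====
def Spec_precompute_interior_ranges (border : List (Int × Int)) (bounds : Int × Int × Int × Int) (out : List (Int × List (Int × Int))) : Prop := out = precompute_interior_ranges_alt border bounds
instance (border : List (Int × Int)) (bounds : Int × Int × Int × Int) (out : List (Int × List (Int × Int))) : Decidable (Spec_precompute_interior_ranges border bounds out) := by unfold Spec_precompute_interior_ranges; infer_instance

-- ===== CLAIM (what is proved, stated in full; the proofs are below) =====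
def Claim_equal_precompute_interior_ranges : Prop := ∀ (border : List (Int × Int)) (bounds : Int × Int × Int × Int), Dom_precompute_interior_ranges border bounds → Spec_precompute_interior_ranges border bounds (precompute_interior_ranges border bounds)

-- ===== LEMMAS AND PROOFS =====

-- the x's of a given row, in list order
def pvRowXs (l : List (Int × Int)) (y : Int) : List Int :=
  (l.filter (fun p => p.2 == y)).map (·.1)

-- the lexicographic (y, x) order B's sort establishes
def pvLexLe (a b : Int × Int) : Prop := a.2 < b.2 ∨ (a.2 = b.2 ∧ a.1 ≤ b.1)

-- ---- dict characterization (A side) ----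
lemma pvDictA_fold_getD : ∀ (l : List (Int × Int)) (d : PySem.Dict Int (List Int)) (y : Int),
    (l.foldl (fun d p => d.modify p.2 [] (fun xs => xs ++ [p.1])) d).getD y []
      = d.getD y [] ++ pvRowXs l y := by
  intro l
  induction l with
  | nil => intro d y; simp [pvRowXs]
  | cons p t ih =>
      intro d y
      simp only [List.foldl_cons]
      rw [ih]
      by_cases h : p.2 = y
      · subst h
        rw [PySem.Dict.getD_modify_self]
        simp [pvRowXs]
      · rw [PySem.Dict.getD_modify_of_ne _ _ _ (fun hh => h hh.symm)]
        simp [pvRowXs, h]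

lemma pvDictA_getD (border : List (Int × Int)) (y : Int) :
    (pvDictA border).getD y [] = pvRowXs border y := by
  unfold pvDictA
  rw [pvDictA_fold_getD]
  simp [PySem.Dict.getD_empty]

lemma pvDictA_fold_contains : ∀ (l : List (Int × Int)) (d : PySem.Dict Int (List Int)) (y : Int),
    (l.foldl (fun d p => d.modify p.2 [] (fun xs => xs ++ [p.1])) d).contains y
      = (d.contains y || l.any (fun p => p.2 == y)) := by
  intro l
  induction l with
  | nil => intro d y; simp
  | cons p t ih =>
      intro d y
      simp only [List.foldl_cons]
      rw [ih, PySem.Dict.contains_modify]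
      simp only [List.any_cons]
      by_cases h : y = p.2
      · subst h; simp
      · have h1 : (y == p.2) = false := by simp [h]
        have h2 : (p.2 == y) = false := by simp [Ne.symm h]
        rw [h1, h2]
        simp

lemma pvDictA_contains (border : List (Int × Int)) (y : Int) :
    (pvDictA border).contains y = border.any (fun p => p.2 == y) := by
  unfold pvDictA
  rw [pvDictA_fold_contains]
  simp [PySem.Dict.contains_empty]

-- ---- pairing: A's index loop and B's zip of slices both pair consecutive elements ----
lemma pvRowRangesA_closed (xs : List Int) (h2 : 2 ≤ xs.length) :
    pvRowRangesA xs = (List.range (xs.length / 2)).map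
      (fun k => (xs.getD (2*k) 0, xs.getD (2*k+1) 0)) := by
  unfold pvRowRangesA
  rw [PySem.List.pyRange_of_pos 0 ((xs.length : Int) - 1) (by omega)]
  rw [List.foldl_map]
  have hc : (if (0:Int) < (xs.length:Int) - 1 then (((xs.length:Int) - 1 - 0 + 2 - 1)/2).toNat else 0)
      = xs.length / 2 := by
    rw [if_pos (by omega)]
    omega
  rw [hc]
  rw [PySem.List.foldl_congr_mem _ _
    (fun r k => r ++ [(xs.getD (2*k) 0, xs.getD (2*k+1) 0)]) _ ?_]
  · rw [PySem.List.foldl_append_singleton_eq_map]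
    simp
  · intro acc k hk
    have hk' : k < xs.length / 2 := List.mem_range.mp hk
    rw [if_pos (by omega)]
    have e2 : (0 : Int) + 2*(k:Int) + 1 = ((2*k+1 : Nat) : Int) := by push_cast; ring
    have e1 : (0 : Int) + 2*(k:Int) = ((2*k : Nat) : Int) := by push_cast; ring
    rw [e2, e1, PySem.List.pyGetD_natCast, PySem.List.pyGetD_natCast]

lemma pvEvens_closed (xs : List Int) (h1 : 1 ≤ xs.length) :
    (PySem.List.slice? xs none none 2).getD []
      = (List.range ((xs.length + 1) / 2)).map (fun k => xs.getD (2*k) 0) := by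
  simp only [PySem.List.slice?, PySem.List.sliceIndices]
  norm_num
  have hc : (if 0 < xs.length then (((xs.length:Int) + 2 - 1)/2).toNat else 0)
      = (xs.length + 1) / 2 := by
    rw [if_pos (by omega)]
    omega
  rw [hc]
  rw [List.filterMap_congr (g := fun k => some (xs.getD (2*k) 0)) ?_]
  · rw [show (fun k => some (xs.getD (2*k) 0)) = some ∘ (fun k => xs.getD (2*k) 0) from rfl,
      List.filterMap_eq_map]
    rfl
  · intro k hk
    have hk' : k < (xs.length + 1) / 2 := List.mem_range.mp hk
    have e1 : ((2*(k:Int))).toNat = 2*k := by omega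
    rw [e1]
    have hlt : 2*k < xs.length := by omega
    rw [List.getElem?_eq_getElem hlt]
    show some xs[2*k] = some (xs.getD (2*k) 0)
    rw [List.getD_eq_getElem _ _ hlt]

lemma pvOdds_closed (xs : List Int) (h2 : 2 ≤ xs.length) :
    (PySem.List.slice? xs (some 1) none 2).getD []
      = (List.range (xs.length / 2)).map (fun k => xs.getD (2*k+1) 0) := by
  simp only [PySem.List.slice?, PySem.List.sliceIndices]
  norm_num
  have hmin : min (1:Int) (xs.length:Int) = 1 := by omega
  rw [hmin]
  have hc : (if 1 < xs.length then (((xs.length:Int) - 1 + 2 - 1)/2).toNat else 0)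
      = xs.length / 2 := by
    rw [if_pos (by omega)]
    omega
  rw [hc]
  rw [List.filterMap_congr (g := fun k => some (xs.getD (2*k+1) 0)) ?_]
  · rw [show (fun k => some (xs.getD (2*k+1) 0)) = some ∘ (fun k => xs.getD (2*k+1) 0) from rfl,
      List.filterMap_eq_map]
    rfl
  · intro k hk
    have hk' : k < xs.length / 2 := List.mem_range.mp hk
    have e1 : ((1 : Int) + 2*(k:Int)).toNat = 2*k+1 := by omega
    rw [e1]
    have hlt : 2*k+1 < xs.length := by omega
    rw [List.getElem?_eq_getElem hlt]
    show some xs[2*k+1] = some (xs.getD (2*k+1) 0)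
    rw [List.getD_eq_getElem _ _ hlt]

lemma pvPairZip_closed (xs : List Int) (h2 : 2 ≤ xs.length) :
    pvPairZip xs = (List.range (xs.length / 2)).map
      (fun k => (xs.getD (2*k) 0, xs.getD (2*k+1) 0)) := by
  unfold pvPairZip
  rw [pvEvens_closed _ (by omega), pvOdds_closed _ h2]
  apply List.ext_getElem
  · simp only [List.length_zip, List.length_map, List.length_range]
    omega
  · intro i hi1 hi2
    simp [List.getElem_zip]

lemma pvRowRangesA_eq_pairZip (xs : List Int) : pvRowRangesA xs = pvPairZip xs := by
  rcases xs with _ | ⟨a, _ | ⟨b, t⟩⟩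
  · decide
  · have h1 : pvRowRangesA [a] = [] := by
      unfold pvRowRangesA
      norm_num
      rw [show PySem.List.pyRange 0 0 2 = [] from by decide]
      simp
    have h2 : pvPairZip [a] = [] := by
      have hO : (PySem.List.slice? [a] (some 1) none 2).getD [] = ([] : List Int) := by
        simp [PySem.List.slice?, PySem.List.sliceIndices]
      unfold pvPairZip
      rw [hO, List.zip_nil_right]
    rw [h1, h2]
  · rw [pvRowRangesA_closed _ (by simp), pvPairZip_closed _ (by simp)]

-- ---- B's sort is the Lex-keyed sort ----
lemma pvSorted2_eq_sortedLex (border : List (Int × Int)) :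
    PySem.List.sorted2 border (fun p => p.2) (fun p => p.1) false
      = PySem.List.sorted border (fun p => (toLex (p.2, p.1) : Lex (Int × Int))) false := by
  have hb : (fun (a b : Int × Int) =>
        (decide (a.2 < b.2) || (!decide (b.2 < a.2) && decide (a.1 < b.1))))
      = (fun (a b : Int × Int) =>
        decide ((toLex (a.2, a.1) : Lex (Int × Int)) < toLex (b.2, b.1))) := by
    funext a b
    rw [Bool.eq_iff_iff]
    simp only [Bool.or_eq_true, Bool.and_eq_true, Bool.not_eq_true', decide_eq_true_eq,
      decide_eq_false_iff_not, Prod.Lex.lt_iff, ofLex_toLex]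
    constructor
    · rintro (h | ⟨h1, h2⟩)
      · exact Or.inl h
      · rcases lt_or_eq_of_le (not_lt.mp h1) with h' | h'
        · exact Or.inl h'
        · exact Or.inr ⟨h', h2⟩
    · rintro (h | ⟨h1, h2⟩)
      · exact Or.inl h
      · exact Or.inr ⟨by omega, h2⟩
  unfold PySem.List.sorted2 PySem.List.sorted
  simp only [Bool.false_eq_true, if_false]
  rw [hb]

lemma pvSorted2_pairwise (border : List (Int × Int)) :
    (PySem.List.sorted2 border (fun p => p.2) (fun p => p.1) false).Pairwise pvLexLe := by
  rw [pvSorted2_eq_sortedLex]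
  have h := PySem.List.sorted_pairwise border (fun p : Int × Int => (toLex (p.2, p.1) : Lex (Int × Int)))
  refine h.imp ?_
  intro a b hab
  rcases Prod.Lex.le_iff.mp hab with h1 | ⟨h1, h2⟩
  · exact Or.inl (by simpa using h1)
  · exact Or.inr ⟨by simpa using h1, by simpa using h2⟩

-- ---- pvGroupRows characterization ----
lemma pvGroupRows_mem_pairwise (lo hi : Int) :
    ∀ (n : Nat) (s : List (Int × Int)), s.length ≤ n → s.Pairwise pvLexLe →
      ((∀ y v, ((y, v) ∈ pvGroupRows lo hi s ↔
        (y ∈ s.map (·.2) ∧ lo ≤ y ∧ y ≤ hi ∧ v = pvPairZip (pvRowXs s y))))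
      ∧ (pvGroupRows lo hi s).Pairwise (fun e e' => e.1 < e'.1)) := by
  intro n
  induction n with
  | zero =>
      intro s hlen _
      have hs : s = [] := List.length_eq_zero_iff.mp (Nat.le_zero.mp hlen)
      subst hs
      constructor
      · intro y v; simp [pvGroupRows]
      · simp [pvGroupRows]
  | succ n ih =>
      intro s hlen hp
      match s with
      | [] =>
          constructor
          · intro y v; simp [pvGroupRows]
          · simp [pvGroupRows]
      | p :: rest =>
          have hstep : pvGroupRows lo hi (p :: rest) =
              if lo ≤ p.2 ∧ p.2 ≤ hi then
                (p.2, pvPairZip ((p :: rest.takeWhile (fun q => q.2 == p.2)).map (·.1)))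
                  :: pvGroupRows lo hi (rest.dropWhile (fun q => q.2 == p.2))
              else pvGroupRows lo hi (rest.dropWhile (fun q => q.2 == p.2)) := by
            rw [pvGroupRows]
          set t := rest.takeWhile (fun q => q.2 == p.2) with ht_def
          set r' := rest.dropWhile (fun q => q.2 == p.2) with hr'_def
          have hpr := List.pairwise_cons.mp hp
          have hhead : ∀ q ∈ rest, pvLexLe p q := hpr.1
          have hp' : rest.Pairwise pvLexLe := hpr.2
          have hsplit : t ++ r' = rest := List.takeWhile_append_dropWhile
          have hr'sub : r'.Sublist rest := List.dropWhile_sublist _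
          have hr'p : r'.Pairwise pvLexLe := List.Pairwise.sublist hr'sub hp'
          have ht : ∀ q ∈ t, q.2 = p.2 := by
            intro q hq
            simpa [beq_iff_eq] using List.mem_takeWhile_imp hq
          have hr' : ∀ q ∈ r', p.2 < q.2 := by
            intro q hq
            rcases hdw : r' with _ | ⟨q0, r''⟩
            · rw [hdw] at hq; simp at hq
            · have hq0f : (q0.2 == p.2) = false := by
                have h0 := List.head?_dropWhile_not (fun q => q.2 == p.2) rest
                rw [← hr'_def, hdw] at h0
                simpa using h0
              have hq0ne : q0.2 ≠ p.2 := by simpa using hq0f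
              have hq0mem : q0 ∈ rest := hr'sub.mem (by rw [hdw]; exact List.mem_cons_self)
              have hpq0 : p.2 < q0.2 := by
                rcases hhead q0 hq0mem with h | ⟨h, _⟩
                · exact h
                · exact absurd h.symm hq0ne
              rw [hdw] at hq
              rcases List.mem_cons.mp hq with rfl | hq
              · exact hpq0
              · have hq0q : pvLexLe q0 q := by
                  have h1 := List.pairwise_cons.mp (hdw ▸ hr'p)
                  exact h1.1 q hq
                rcases hq0q with h | ⟨h, _⟩
                · omega
                · omega
          have hrowhead : pvRowXs (p :: rest) p.2 = (p :: t).map (·.1) := by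
            unfold pvRowXs
            rw [← hsplit]
            simp only [List.filter_cons, List.filter_append, beq_self_eq_true, if_true]
            rw [List.filter_eq_self.mpr (by
              intro q hq
              simpa [beq_iff_eq] using ht q hq)]
            rw [List.filter_eq_nil_iff.mpr (by
              intro q hq
              have h1 := hr' q hq
              simp only [beq_iff_eq]
              omega)]
            simp
          have hrowtail : ∀ y, y ≠ p.2 → pvRowXs (p :: rest) y = pvRowXs r' y := by
            intro y hy
            unfold pvRowXs
            rw [← hsplit]
            simp only [List.filter_cons, List.filter_append]
            rw [if_neg (by simp only [beq_iff_eq]; omega)]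
            rw [List.filter_eq_nil_iff.mpr (by
              intro q hq
              have h1 := ht q hq
              simp only [beq_iff_eq]
              omega)]
            rw [List.nil_append]
          have hlen' : r'.length ≤ n := by
            have h1 := List.length_dropWhile_le (fun q => q.2 == p.2) rest
            simp only [List.length_cons] at hlen
            rw [hr'_def]
            omega
          obtain ⟨ihmem, ihpw⟩ := ih r' hlen' hr'p
          have hmem_snd : ∀ y, y ∈ r'.map (·.2) → p.2 < y := by
            intro y hy
            rcases List.mem_map.mp hy with ⟨q, hq, rfl⟩
            exact hr' q hq
          by_cases hb : lo ≤ p.2 ∧ p.2 ≤ hi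
          · rw [hstep, if_pos hb]
            constructor
            · intro y v
              constructor
              · intro hmem
                rcases List.mem_cons.mp hmem with heq | hmem'
                · have hy : y = p.2 := congrArg Prod.fst heq
                  subst hy
                  have hv : v = pvPairZip ((p :: t).map (·.1)) := congrArg Prod.snd heq
                  exact ⟨by simp, hb.1, hb.2, by rw [hrowhead]; exact hv⟩
                · obtain ⟨hy, hl, hh, hv⟩ := (ihmem y v).mp hmem'
                  have hylt : p.2 < y := hmem_snd y hy
                  refine ⟨?_, hl, hh, ?_⟩
                  · simp only [List.map_cons, List.mem_cons]
                    right
                    rcases List.mem_map.mp hy with ⟨q, hq, rfl⟩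
                    exact List.mem_map.mpr ⟨q, hr'sub.mem hq, rfl⟩
                  · rw [hrowtail y (by omega)]; exact hv
              · rintro ⟨hy, hl, hh, hv⟩
                by_cases hyp : y = p.2
                · subst hyp
                  rw [hrowhead] at hv
                  rw [hv]
                  exact List.mem_cons_self
                · right
                  apply (ihmem y v).mpr
                  refine ⟨?_, hl, hh, ?_⟩
                  · rcases List.mem_map.mp hy with ⟨q, hq, rfl⟩
                    rcases List.mem_cons.mp hq with rfl | hq'
                    · exact absurd rfl hyp
                    · rw [← hsplit] at hq'
                      rcases List.mem_append.mp hq' with hq'' | hq''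
                      · exact absurd (ht q hq'') hyp
                      · exact List.mem_map.mpr ⟨q, hq'', rfl⟩
                  · rw [← hrowtail y hyp]; exact hv
            · rw [List.pairwise_cons]
              constructor
              · intro e he
                have h1 : e.1 ∈ r'.map (·.2) := ((ihmem e.1 e.2).mp (by simpa using he)).1
                exact hmem_snd e.1 h1
              · exact ihpw
          · rw [hstep, if_neg hb]
            constructor
            · intro y v
              constructor
              · intro hmem
                obtain ⟨hy, hl, hh, hv⟩ := (ihmem y v).mp hmem
                have hylt : p.2 < y := hmem_snd y hy
                refine ⟨?_, hl, hh, ?_⟩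
                · simp only [List.map_cons, List.mem_cons]
                  right
                  rcases List.mem_map.mp hy with ⟨q, hq, rfl⟩
                  exact List.mem_map.mpr ⟨q, hr'sub.mem hq, rfl⟩
                · rw [hrowtail y (by omega)]; exact hv
              · rintro ⟨hy, hl, hh, hv⟩
                by_cases hyp : y = p.2
                · subst hyp; exact absurd ⟨hl, hh⟩ hb
                · apply (ihmem y v).mpr
                  refine ⟨?_, hl, hh, ?_⟩
                  · rcases List.mem_map.mp hy with ⟨q, hq, rfl⟩
                    rcases List.mem_cons.mp hq with rfl | hq'
                    · exact absurd rfl hyp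
                    · rw [← hsplit] at hq'
                      rcases List.mem_append.mp hq' with hq'' | hq''
                      · exact absurd (ht q hq'') hyp
                      · exact List.mem_map.mpr ⟨q, hq'', rfl⟩
                  · rw [← hrowtail y hyp]; exact hv
            · exact ihpw

-- ---- generic: strictly fst-increasing permutations are equal ----
lemma pv_eq_of_perm_of_pairwise_lt_fst {α : Type} :
    ∀ (l₁ l₂ : List (Int × α)), l₁.Perm l₂ →
      l₁.Pairwise (fun a b => a.1 < b.1) → l₂.Pairwise (fun a b => a.1 < b.1) → l₁ = l₂ := by
  intro l₁
  induction l₁ with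
  | nil =>
      intro l₂ hperm _ _
      exact List.Perm.nil_eq hperm
  | cons a l ih =>
      intro l₂ hperm hp1 hp2
      rcases l₂ with _ | ⟨b, m⟩
      · exact absurd (List.Perm.eq_nil hperm) (by simp)
      · by_cases hab : a = b
        · subst hab
          have h1 := ih m (hperm.cons_inv) (List.pairwise_cons.mp hp1).2 (List.pairwise_cons.mp hp2).2
          rw [h1]
        · have ha : a ∈ b :: m := hperm.mem_iff.mp (List.mem_cons_self)
          have hb' : b ∈ a :: l := hperm.symm.mem_iff.mp (List.mem_cons_self)
          have ham : a ∈ m := by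
            rcases List.mem_cons.mp ha with h | h
            · exact absurd h hab
            · exact h
          have hbl : b ∈ l := by
            rcases List.mem_cons.mp hb' with h | h
            · exact absurd h.symm hab
            · exact h
          have h1 : a.1 < b.1 := (List.pairwise_cons.mp hp1).1 b hbl
          have h2 : b.1 < a.1 := (List.pairwise_cons.mp hp2).1 a ham
          omega

-- ===== VERDICT (by name: the statement is the Claim_ definition above) =====
theorem precompute_interior_ranges_spec : Claim_equal_precompute_interior_ranges := by
  unfold Claim_equal_precompute_interior_ranges
  intro border bounds _
  unfold Spec_precompute_interior_ranges
  obtain ⟨mx, Mx, lo, hi⟩ := bounds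
  -- A in closed form
  have hA : precompute_interior_ranges border (mx, Mx, lo, hi)
      = ((PySem.List.pyRange lo (hi+1) 1).filter (fun y => border.any (fun p => p.2 == y))).map
          (fun y => (y, pvPairZip (PySem.List.sorted (pvRowXs border y) (fun x => x) false))) := by
    unfold precompute_interior_ranges
    simp only []
    rw [PySem.List.foldl_append_if
      (p := fun y => (pvDictA border).contains y)
      (f := fun y => (y, pvRowRangesA (PySem.List.sorted ((pvDictA border).getD y []) (fun x => x) false)))]
    rw [List.nil_append]
    rw [List.filter_congr (fun y _ => pvDictA_contains border y)]
    apply List.map_congr_left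
    intro y _
    rw [pvDictA_getD, pvRowRangesA_eq_pairZip]
  -- B side
  have hsp := pvSorted2_pairwise border
  have hperm : (PySem.List.sorted2 border (fun p => p.2) (fun p => p.1) false).Perm border :=
    PySem.List.sorted2_perm border _ _ _
  obtain ⟨hBmem, hBpw⟩ := pvGroupRows_mem_pairwise lo hi
    (PySem.List.sorted2 border (fun p => p.2) (fun p => p.1) false).length
    (PySem.List.sorted2 border (fun p => p.2) (fun p => p.1) false) le_rfl hsp
  have hB : precompute_interior_ranges_alt border (mx, Mx, lo, hi)
      = pvGroupRows lo hi (PySem.List.sorted2 border (fun p => p.2) (fun p => p.1) false) := rfl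
  rw [hA, hB]
  -- row values agree
  have hrow : ∀ y, pvRowXs (PySem.List.sorted2 border (fun p => p.2) (fun p => p.1) false) y
      = PySem.List.sorted (pvRowXs border y) (fun x => x) false := by
    intro y
    symm
    apply PySem.List.sorted_id_eq_of_perm_of_pairwise
    · exact ((hperm.filter _).map _)
    · unfold pvRowXs
      rw [List.pairwise_map]
      have hf : ((PySem.List.sorted2 border (fun p => p.2) (fun p => p.1) false).filter
          (fun p => p.2 == y)).Pairwise pvLexLe := List.Pairwise.filter _ hsp
      apply List.pairwise_iff_forall_sublist.mpr
      intro a b hsl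
      have hab : pvLexLe a b := List.pairwise_iff_forall_sublist.mp hf hsl
      have hamem : a ∈ (PySem.List.sorted2 border (fun p => p.2) (fun p => p.1) false).filter
          (fun p => p.2 == y) := hsl.subset (by simp)
      have hbmem : b ∈ (PySem.List.sorted2 border (fun p => p.2) (fun p => p.1) false).filter
          (fun p => p.2 == y) := hsl.subset (by simp)
      have ha2 : a.2 = y := by simpa [beq_iff_eq] using (List.mem_filter.mp hamem).2
      have hb2 : b.2 = y := by simpa [beq_iff_eq] using (List.mem_filter.mp hbmem).2
      rcases hab with h | ⟨_, h⟩
      · omega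
      · exact h
  -- both lists are strictly fst-increasing with the same members
  have hpwA : (((PySem.List.pyRange lo (hi+1) 1).filter (fun y => border.any (fun p => p.2 == y))).map
      (fun y => (y, pvPairZip (PySem.List.sorted (pvRowXs border y) (fun x => x) false)))).Pairwise
      (fun e e' => e.1 < e'.1) := by
    rw [List.pairwise_map]
    exact List.Pairwise.filter _ (PySem.List.pairwise_lt_pyRange_one lo (hi+1))
  apply pv_eq_of_perm_of_pairwise_lt_fst
  · apply (List.perm_ext_iff_of_nodup
      (hpwA.imp (fun h => by intro heq; rw [heq] at h; exact lt_irrefl _ h))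
      (hBpw.imp (fun h => by intro heq; rw [heq] at h; exact lt_irrefl _ h))).mpr
    rintro ⟨y, v⟩
    constructor
    · intro hmem
      rcases List.mem_map.mp hmem with ⟨y', hy', heq⟩
      have hy0 : y' = y := congrArg Prod.fst heq
      subst hy0
      have hveq : pvPairZip (PySem.List.sorted (pvRowXs border y') (fun x => x) false) = v :=
        congrArg Prod.snd heq
      have hy'' := List.mem_filter.mp hy'
      have hrange := PySem.List.mem_pyRange_one.mp hy''.1
      have hyb : y' ∈ border.map (·.2) := by
        rcases List.any_eq_true.mp hy''.2 with ⟨q, hq, hq2⟩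
        exact List.mem_map.mpr ⟨q, hq, by simpa [beq_iff_eq] using hq2⟩
      apply (hBmem y' v).mpr
      refine ⟨((hperm.map (·.2)).mem_iff).mpr hyb, hrange.1, by omega, ?_⟩
      rw [hrow]
      exact hveq.symm
    · intro hmem
      obtain ⟨hy, hl, hh, hv⟩ := (hBmem y v).mp hmem
      apply List.mem_map.mpr
      refine ⟨y, ?_, ?_⟩
      · apply List.mem_filter.mpr
        refine ⟨PySem.List.mem_pyRange_one.mpr ⟨hl, by omega⟩, ?_⟩
        apply List.any_eq_true.mpr
        rcases List.mem_map.mp ((hperm.map (·.2)).mem_iff.mp hy) with ⟨q, hq, hqe⟩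
        exact ⟨q, hq, by simp [hqe]⟩
      · rw [hv, hrow]
  · exact hpwA
  · exact hBpw
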